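-- pv_equiv track=rewrite | github.com/pypi-data/pypi-mirror-369 | packages/vibe-automation/vibe_automation-0.8.0-py3-none-any.whl/va/playwright/dom_utils.py | condensed_path
-- ===== SOURCE A (Python) =====
-- def condensed_path(page: str, target: str) -> str:
--     """
--     Return the minimal subtree (with `- ...` placeholders) that leads
--     from the page root down to `target`.
--
--     Parameters
--     ----------
--     page   : full page string (one line per node, leading spaces = indent)
--     target : exact text of the target node (e.g. '- textbox "Check-in Date *" [ref=e1]')
--
--     Returns
--     -------
--     str  –  subtree string in the same line-based format
--     """
--     lines = page.splitlines()
--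
--     # helper to get indent width in spaces
--     def indent_of(line: str) -> int:
--         return len(line) - len(line.lstrip())
--
--     # locate the target line in the page
--     tgt_clean = target.strip().splitlines()[0]
--     try:
--         tgt_idx = next(i for i, ln in enumerate(lines) if ln.strip() == tgt_clean)
--     except StopIteration:
--         raise ValueError("target line not found")
--
--     # walk upward, collecting (indent, stripped_text)
--     path = []
--     cur_indent = indent_of(lines[tgt_idx])
--     path.append((cur_indent, lines[tgt_idx].lstrip()))
--
--     for i in range(tgt_idx - 1, -1, -1):
--         ind = indent_of(lines[i])
--         if ind < cur_indent:
--             path.append((ind, lines[i].lstrip()))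
--             cur_indent = ind
--             if ind == 0:  # reached page root
--                 break
--
--     path.reverse()  # now root … target
--
--     # recursive assembler -------------------------------------------------
--     def assemble(k: int) -> str:
--         indent, text = path[k]
--         out = [" " * indent + text]  # node itself
--
--         if k + 1 < len(path):  # has a child in the path
--             out.append(assemble(k + 1))
--
--             # insert "- ..." for skipped siblings
--             if k > 0:  # DON'T add one for the outermost root
--                 child_indent = path[k + 1][0]
--                 out.append(" " * child_indent + "- ...")
--
--         return "\n".join(out)
--
--     return assemble(0)
-- ===== SOURCE B (Python) =====
-- def condensed_path(page: str, target: str) -> str: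
--     """Single forward pass: an ancestor stack replaces A's locate-then-walk-up,
--     and an iterative builder replaces the recursive assembler."""
--     tgt_clean = target.strip().splitlines()[0]
--
--     stack = []
--     found = False
--     for line in page.splitlines():
--         ind = len(line) - len(line.lstrip())
--         while stack and stack[-1][0] >= ind:
--             stack.pop()
--         stack.append((ind, line.lstrip()))
--         if line.strip() == tgt_clean:
--             found = True
--             break
--     if not found:
--         raise ValueError("target line not found")
--
--     out = [" " * ind + text for ind, text in stack]
--     for i in range(len(stack) - 1, 1, -1):
--         out.append(" " * stack[i][0] + "- ...")
--     return "\n".join(out)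
-- ===== Notes on version B (the rewrite author's own statement) =====
-- stated objective: alternative
-- what changed: A locates the target line, then walks upward collecting ancestors, then assembles the subtree with a recursive function; B does one forward pass maintaining an ancestor stack (popping entries with indent >= current) and builds the output iteratively: rendered path lines followed by '- ...' placeholders from deepest to depth 2.
import Mathlib
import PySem

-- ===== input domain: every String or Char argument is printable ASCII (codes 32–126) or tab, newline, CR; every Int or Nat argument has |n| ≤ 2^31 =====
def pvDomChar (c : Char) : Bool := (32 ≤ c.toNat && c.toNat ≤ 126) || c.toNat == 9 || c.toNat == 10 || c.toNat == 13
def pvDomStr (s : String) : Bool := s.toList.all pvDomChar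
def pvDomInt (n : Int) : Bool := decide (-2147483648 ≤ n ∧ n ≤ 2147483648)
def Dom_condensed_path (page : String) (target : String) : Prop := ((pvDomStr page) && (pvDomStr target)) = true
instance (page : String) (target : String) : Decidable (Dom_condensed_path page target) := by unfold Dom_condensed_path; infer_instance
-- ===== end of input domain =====

-- B replaces A's locate-then-walk-up scan and recursive assembler by a single forward
-- pass with an ancestor stack and an iterative output builder (objective: alternative).

-- ===== PORT A =====

-- indent_of(line) = len(line) - len(line.lstrip())
def pvA_indentOf (l : String) : Int :=
  PySem.Str.len l - PySem.Str.len (PySem.Str.lstrip l)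

-- for i in range(tgt_idx-1, -1, -1): ... (the `break` on ind == 0 stops the recursion)
def pvA_walk (lines : List String) :
    List Int → List (Int × String) × Int → List (Int × String) × Int
  | [], st => st
  | i :: rest, (path, cur) =>
    let ln := PySem.List.pyGetD lines i ""
    let ind := pvA_indentOf ln
    if ind < cur then
      let path' := path ++ [(ind, PySem.Str.lstrip ln)]
      if ind = 0 then (path', ind) else pvA_walk lines rest (path', ind)
    else pvA_walk lines rest (path, cur)

-- the recursive assemble(k); `" " * indent + text` is built char-for-char
def pvA_assemble (path : List (Int × String)) (k : Nat) : String :=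
  let p := PySem.List.pyGetD path (k : Int) (0, "")
  let node := String.ofList (List.replicate p.1.toNat ' ' ++ p.2.toList)
  if h : k + 1 < path.length then
    let child := pvA_assemble path (k + 1)
    if 0 < k then
      let ci := (PySem.List.pyGetD path ((k : Int) + 1) (0, "")).1
      PySem.Str.join "\n" [node, child, String.ofList (List.replicate ci.toNat ' ' ++ "- ...".toList)]
    else
      PySem.Str.join "\n" [node, child]
  else
    PySem.Str.join "\n" [node]
termination_by path.length - k

def condensed_path (page : String) (target : String) : String :=
  let lines := PySem.Str.splitlines page
  -- target.strip().splitlines()[0]; the IndexError on an all-whitespace target is outside Pre_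
  let tgt_clean := PySem.List.pyGetD (PySem.Str.splitlines (PySem.Str.strip target)) 0 ""
  match (PySem.List.enumerate lines).find? (fun p => PySem.Str.strip p.2 == tgt_clean) with
  | none => ""   -- python: raise ValueError("target line not found"); outside Pre_
  | some (tgt_idx, _) =>
    let tln := PySem.List.pyGetD lines tgt_idx ""
    let cur := pvA_indentOf tln
    let res := pvA_walk lines (PySem.List.pyRange (tgt_idx - 1) (-1) (-1))
                 ([(cur, PySem.Str.lstrip tln)], cur)
    pvA_assemble res.1.reverse 0

-- ===== PORT B =====

-- while stack and stack[-1][0] >= ind: stack.pop()   (stack kept top-at-head here)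
def pvB_pop (st : List (Int × String)) (ind : Int) : List (Int × String) :=
  st.dropWhile (fun p => ind ≤ p.1)

-- the single forward pass: pop ancestors with indent >= ind, push, stop at the target
def pvB_loop (tgt : String) : List String → List (Int × String) → Option (List (Int × String))
  | [], _ => none
  | l :: rest, st =>
    let ind := PySem.Str.len l - PySem.Str.len (PySem.Str.lstrip l)
    let st' := (ind, PySem.Str.lstrip l) :: pvB_pop st ind
    if PySem.Str.strip l == tgt then some st' else pvB_loop tgt rest st'

def condensed_path_alt (page : String) (target : String) : String :=
  let tgt_clean := PySem.List.pyGetD (PySem.Str.splitlines (PySem.Str.strip target)) 0 ""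
  match pvB_loop tgt_clean (PySem.Str.splitlines page) [] with
  | none => ""   -- python: raise ValueError("target line not found"); outside Pre_
  | some st =>
    let path := st.reverse
    let out := path.map (fun p => String.ofList (List.replicate p.1.toNat ' ' ++ p.2.toList))
    let phs := (PySem.List.pyRange ((path.length : Int) - 1) 1 (-1)).map
      (fun i => String.ofList (List.replicate (PySem.List.pyGetD path i (0, "")).1.toNat ' ' ++ "- ...".toList))
    PySem.Str.join "\n" (out ++ phs)

-- ===== PRECONDITION & SPEC =====

-- Pre_ excludes exactly the inputs where the Python raises: an all-whitespace/empty target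
-- (IndexError on [0]) and a target whose cleaned first line matches no stripped page line
-- (the explicit ValueError).
def Pre_condensed_path (page : String) (target : String) : Prop :=
  (((PySem.Str.splitlines (PySem.Str.strip target)).take 1).any
    (fun t0 => (PySem.Str.splitlines page).any
      (fun ln => PySem.Str.strip ln == t0))) = true

instance (page : String) (target : String) : Decidable (Pre_condensed_path page target) := by
  unfold Pre_condensed_path; infer_instance

def pvWitness_condensed_path : String × String := ("a", "a")

def Spec_condensed_path (page : String) (target : String) (out : String) : Prop :=
  out = condensed_path_alt page target
instance (page : String) (target : String) (out : String) : Decidable (Spec_condensed_path page target out) := by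
  unfold Spec_condensed_path; infer_instance

-- ===== CLAIM (what is proved, stated in full; the proofs are below) =====
def Claim_equal_condensed_path : Prop := ∀ (page : String) (target : String), Dom_condensed_path page target → Pre_condensed_path page target → Spec_condensed_path page target (condensed_path page target)

-- ===== LEMMAS AND PROOFS =====

-- A's indent/text pair for a line
def pvEntry (l : String) : Int × String := (pvA_indentOf l, PySem.Str.lstrip l)

-- one step of B's stack update
def pvStep (st : List (Int × String)) (l : String) : List (Int × String) :=
  pvEntry l :: pvB_pop st (pvA_indentOf l)

-- B's stack after consuming a (match-free) prefix
def pvStack (pre : List String) : List (Int × String) := pre.foldl pvStep []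

-- A's upward walk, phrased over the reversed prefix (nearest line first)
def pvChain : List String → Int → List (Int × String)
  | [], _ => []
  | l :: rest, cur =>
    if pvA_indentOf l < cur then
      if pvA_indentOf l = 0 then [pvEntry l] else pvEntry l :: pvChain rest (pvA_indentOf l)
    else pvChain rest cur

-- split a line list at the first line whose strip equals tgt
def pvSplitFirst (tgt : String) : List String → Option (List String × String × List String)
  | [] => none
  | l :: rest =>
    if PySem.Str.strip l == tgt then some ([], l, rest)
    else (pvSplitFirst tgt rest).map (fun m => (l :: m.1, m.2.1, m.2.2))

def pvRender (p : Int × String) : String :=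
  String.ofList (List.replicate p.1.toNat ' ' ++ p.2.toList)

def pvPh (p : Int × String) : String :=
  String.ofList (List.replicate p.1.toNat ' ' ++ "- ...".toList)

theorem pv_dropWhile_dropWhile {α : Type} (p q : α → Bool) (h : ∀ x, q x = true → p x = true) :
    ∀ s : List α, List.dropWhile p (List.dropWhile q s) = List.dropWhile p s := by
  intro s
  induction s with
  | nil => simp
  | cons x t ih =>
    by_cases hq : q x = true
    · simp [hq, h x hq, ih]
    · simp [List.dropWhile_cons, hq]

theorem pv_indent_nonneg (l : String) : 0 ≤ pvA_indentOf l := by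
  unfold pvA_indentOf
  simp [PySem.Str.len_eq, PySem.Str.toList_lstrip, PySem.Chars.lstrip]
  exact_mod_cast List.length_dropWhile_le _ _

theorem pv_stack_append (pre : List String) (l : String) :
    pvStack (pre ++ [l]) = pvStep (pvStack pre) l := by
  simp [pvStack]

theorem pv_stack_nonneg (pre : List String) : ∀ p ∈ pvStack pre, 0 ≤ p.1 := by
  induction pre using List.reverseRecOn with
  | nil => simp [pvStack]
  | append_singleton pre l ih =>
    rw [pv_stack_append]
    intro p hp
    rcases List.mem_cons.mp hp with h | h
    · subst h; exact pv_indent_nonneg l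
    · exact ih p ((List.dropWhile_sublist _).mem h)

theorem pv_pop_stack_eq_chain (pre : List String) : ∀ c : Int,
    pvB_pop (pvStack pre) c = pvChain pre.reverse c := by
  induction pre using List.reverseRecOn with
  | nil => intro c; simp [pvStack, pvB_pop, pvChain]
  | append_singleton pre l ih =>
    intro c
    rw [pv_stack_append]
    simp only [List.reverse_append, List.reverse_singleton, List.singleton_append]
    by_cases hlt : pvA_indentOf l < c
    · have hhead : ¬ (c ≤ (pvEntry l).1) := by simp [pvEntry]; omega
      unfold pvStep pvB_pop
      rw [List.dropWhile_cons]
      simp only [hhead, decide_false]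
      simp only [Bool.false_eq_true, if_false]
      by_cases h0 : pvA_indentOf l = 0
      · have hnil : List.dropWhile (fun p : Int × String => decide (pvA_indentOf l ≤ p.1)) (pvStack pre) = [] := by
          rw [List.dropWhile_eq_nil_iff]
          intro p hp
          rw [h0]
          simpa using pv_stack_nonneg pre p hp
        rw [hnil, pvChain, if_pos hlt, if_pos h0]
      · rw [pvChain, if_pos hlt, if_neg h0, ← ih (pvA_indentOf l)]
        rfl
    · have hhead : (c ≤ (pvEntry l).1) := by simp [pvEntry]; omega
      unfold pvStep pvB_pop
      rw [List.dropWhile_cons]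
      simp only [hhead, decide_true]
      rw [pvChain]
      simp only [hlt, if_false]
      rw [← ih c]
      unfold pvB_pop
      exact pv_dropWhile_dropWhile _ _ (by intro x hx; simp at hx ⊢; omega) _

theorem pv_loop_eq (tgt : String) :
    ∀ (lines pre : List String),
      pvB_loop tgt lines (pvStack pre) =
        (pvSplitFirst tgt lines).map (fun m => pvStep (pvStack (pre ++ m.1)) m.2.1) := by
  intro lines
  induction lines with
  | nil => intro pre; simp [pvB_loop, pvSplitFirst]
  | cons l rest ih =>
    intro pre
    rw [pvB_loop, pvSplitFirst]
    have hst : ((PySem.Str.len l - PySem.Str.len (PySem.Str.lstrip l), PySem.Str.lstrip l) ::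
        pvB_pop (pvStack pre) (PySem.Str.len l - PySem.Str.len (PySem.Str.lstrip l))) =
        pvStack (pre ++ [l]) := by
      rw [pv_stack_append]; rfl
    by_cases hm : (PySem.Str.strip l == tgt) = true
    · simp only [hm, if_true, Option.map_some, List.append_nil]
      rw [hst, pv_stack_append]
    · simp only [hm, if_false, Bool.false_eq_true]
      rw [hst, ih (pre ++ [l])]
      cases h : pvSplitFirst tgt rest with
      | none => simp
      | some m => simp [List.append_assoc]

theorem pv_find_enumerate (tgt : String) :
    ∀ (lines : List String) (s : Int),
      (PySem.List.enumerate lines s).find? (fun p => PySem.Str.strip p.2 == tgt) =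
        (pvSplitFirst tgt lines).map (fun m => (s + m.1.length, m.2.1)) := by
  intro lines
  induction lines with
  | nil => intro s; simp [PySem.List.enumerate_nil, pvSplitFirst]
  | cons l rest ih =>
    intro s
    rw [PySem.List.enumerate_cons, pvSplitFirst, List.find?_cons]
    by_cases hm : (PySem.Str.strip l == tgt) = true
    · simp [hm]
    · simp only [hm, if_false, Bool.false_eq_true]
      rw [ih (s + 1)]
      cases h : pvSplitFirst tgt rest with
      | none => simp
      | some m => simp; ring
  

theorem pv_splitFirst_decomp (tgt : String) :
    ∀ (lines mid rest : List String) (l : String),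
      pvSplitFirst tgt lines = some (mid, l, rest) → lines = mid ++ l :: rest := by
  intro lines
  induction lines with
  | nil => intro mid rest l h; simp [pvSplitFirst] at h
  | cons x xs ih =>
    intro mid rest l h
    rw [pvSplitFirst] at h
    by_cases hm : (PySem.Str.strip x == tgt) = true
    · simp [hm] at h
      obtain ⟨h1, h2, h3⟩ := h
      subst h1; subst h2; subst h3; rfl
    · rw [if_neg hm] at h
      cases hs : pvSplitFirst tgt xs with
      | none => rw [hs] at h; simp at h
      | some m =>
        rw [hs] at h
        simp only [Option.map_some, Option.some.injEq, Prod.ext_iff] at h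
        obtain ⟨h1, h2, h3⟩ := h
        have hxs := ih m.1 m.2.2 m.2.1 (by rw [hs])
        subst h1; subst h2; subst h3
        simp [hxs]
  

theorem pv_pyRange_down_cons (j : Nat) :
    PySem.List.pyRange (j : Int) (-1) (-1) = (j : Int) :: PySem.List.pyRange ((j : Int) - 1) (-1) (-1) := by
  rw [PySem.List.pyRange_neg_one_eq_reverse, PySem.List.pyRange_neg_one_eq_reverse]
  have h1 : (-1 : Int) + 1 = 0 := by ring
  rw [h1]
  have h2 : PySem.List.pyRange 0 ((j : Int) + 1) = PySem.List.pyRange 0 (j : Int) ++ PySem.List.pyRange (j : Int) ((j : Int) + 1) :=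
    PySem.List.pyRange_one_append 0 (j : Int) ((j : Int) + 1) (by positivity) (by omega)
  have h3 : PySem.List.pyRange (j : Int) ((j : Int) + 1) = [(j : Int)] := by
    rw [PySem.List.pyRange_one_cons (by omega)]
    simp
  have h4 : (j : Int) - 1 + 1 = (j : Int) := by ring
  rw [h2, h3, h4, List.reverse_append]
  simp
  

theorem pv_walk_eq_chain (mid : List String) :
    ∀ (rest : List String) (init : List (Int × String)) (cur : Int),
      (pvA_walk (mid ++ rest) (PySem.List.pyRange ((mid.length : Int) - 1) (-1) (-1)) (init, cur)).1 =
        init ++ pvChain mid.reverse cur := by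
  induction mid using List.reverseRecOn with
  | nil =>
    intro rest init cur
    have hempty : PySem.List.pyRange ((List.length ([] : List String) : Int) - 1) (-1) (-1) = [] := by
      rw [show ((List.length ([] : List String) : Int) - 1) = -1 by simp,
        PySem.List.pyRange_neg_one_eq_reverse]
      simp [PySem.List.pyRange_one]
    rw [hempty]
    simp [pvA_walk, pvChain]
  | append_singleton mid l ih =>
    intro rest init cur
    have hlen : ((List.length (mid ++ [l]) : Int) - 1) = (mid.length : Int) := by
      simp
    rw [hlen, pv_pyRange_down_cons mid.length]
    have hln : PySem.List.pyGetD ((mid ++ [l]) ++ rest) ((mid.length : Int)) "" = l := by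
      rw [List.append_assoc, List.singleton_append]
      simp [PySem.List.pyGetD, PySem.List.pyGet?_append_length]
    rw [pvA_walk]
    simp only [hln, List.reverse_append, List.reverse_singleton, List.singleton_append, pvChain]
    by_cases hlt : pvA_indentOf l < cur
    · rw [if_pos hlt, if_pos hlt]
      by_cases h0 : pvA_indentOf l = 0
      · rw [if_pos h0, if_pos h0]
        simp [pvEntry]
      · rw [if_neg h0, if_neg h0]
        have hmr : (mid ++ [l]) ++ rest = mid ++ (l :: rest) := by
          rw [List.append_assoc, List.singleton_append]
        rw [hmr, ih (l :: rest) (init ++ [(pvA_indentOf l, PySem.Str.lstrip l)]) (pvA_indentOf l)]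
        simp [pvEntry]
    · rw [if_neg hlt, if_neg hlt]
      have hmr : (mid ++ [l]) ++ rest = mid ++ (l :: rest) := by
        rw [List.append_assoc, List.singleton_append]
      rw [hmr, ih (l :: rest) init cur]

theorem pv_join_cons (sep x : List Char) (ys : List (List Char)) (h : ys ≠ []) :
    PySem.Chars.join sep (x :: ys) = x ++ sep ++ PySem.Chars.join sep ys := by
  cases ys with
  | nil => exact absurd rfl h
  | cons z zs => exact PySem.Chars.join_cons_cons sep x z zs

theorem pv_join_append_singleton (sep x : List Char) :
    ∀ xs : List (List Char), xs ≠ [] →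
      PySem.Chars.join sep (xs ++ [x]) = PySem.Chars.join sep xs ++ sep ++ x := by
  intro xs
  induction xs with
  | nil => intro h; exact absurd rfl h
  | cons y ys ih =>
    intro _
    cases ys with
    | nil =>
      rw [List.singleton_append, PySem.Chars.join_cons_cons,
        PySem.Chars.join_singleton, PySem.Chars.join_singleton]
    | cons z zs =>
      have h1 : (y :: z :: zs) ++ [x] = y :: ((z :: zs) ++ [x]) := rfl
      rw [h1, pv_join_cons sep y _ (by simp), ih (by simp), PySem.Chars.join_cons_cons]
      simp [List.append_assoc]

theorem pv_strjoin2 (sep node : String) (mid : List String) (h : mid ≠ []) :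
    PySem.Str.join sep [node, PySem.Str.join sep mid] = PySem.Str.join sep (node :: mid) := by
  rw [← String.toList_inj]
  rw [PySem.Str.toList_join, PySem.Str.toList_join]
  simp only [List.map_cons, List.map_nil, PySem.Str.toList_join]
  rw [PySem.Chars.join_cons_cons, PySem.Chars.join_singleton,
    pv_join_cons _ _ _ (by simpa using h)]

theorem pv_strjoin3 (sep node ph : String) (mid : List String) (h : mid ≠ []) :
    PySem.Str.join sep [node, PySem.Str.join sep mid, ph] =
      PySem.Str.join sep (node :: (mid ++ [ph])) := by
  rw [← String.toList_inj]
  rw [PySem.Str.toList_join, PySem.Str.toList_join]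
  simp only [List.map_cons, List.map_nil, List.map_append, PySem.Str.toList_join]
  rw [PySem.Chars.join_cons_cons, PySem.Chars.join_cons_cons, PySem.Chars.join_singleton,
    pv_join_cons _ _ _ (by simp [by simpa using h]),
    pv_join_append_singleton _ _ _ (by simpa using h)]

theorem pv_assemble_aux (P : List (Int × String)) :
    ∀ (m k : Nat), 1 ≤ k → k < P.length → P.length - k = m + 1 →
      pvA_assemble P k =
        PySem.Str.join "\n" ((P.drop k).map pvRender ++ ((P.drop (k + 1)).map pvPh).reverse) := by
  intro m
  induction m with
  | zero =>
    intro k h1 h2 h3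
    have hget : PySem.List.pyGetD P ((k : Nat) : Int) (0, "") = P[k] := by
      rw [PySem.List.pyGetD_natCast, List.getD_eq_getElem P _ h2]
    rw [pvA_assemble, dif_neg (by omega : ¬ (k + 1 < P.length))]
    rw [List.drop_eq_getElem_cons h2, List.drop_eq_nil_of_le (by omega : P.length ≤ k + 1)]
    rw [hget]
    simp [pvRender]
  | succ m ihm =>
    intro k h1 h2 h3
    have hk1 : k + 1 < P.length := by omega
    have hget : PySem.List.pyGetD P ((k : Nat) : Int) (0, "") = P[k] := by
      rw [PySem.List.pyGetD_natCast, List.getD_eq_getElem P _ h2]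
    have hget1 : PySem.List.pyGetD P (((k : Nat) : Int) + 1) (0, "") = P[k + 1] := by
      rw [show ((k : Nat) : Int) + 1 = ((k + 1 : Nat) : Int) by push_cast; ring,
        PySem.List.pyGetD_natCast, List.getD_eq_getElem P _ hk1]
    rw [pvA_assemble, dif_pos hk1, if_pos (by omega : 0 < k)]
    rw [ihm (k + 1) (by omega) hk1 (by omega)]
    rw [hget, hget1]
    have hne : (P.drop (k + 1)).map pvRender ++ ((P.drop (k + 2)).map pvPh).reverse ≠ [] := by
      intro hc
      rcases List.append_eq_nil_iff.mp hc with ⟨hc1, _⟩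
      have := List.drop_eq_nil_iff.mp (List.map_eq_nil_iff.mp hc1)
      omega
    rw [pv_strjoin3 _ _ _ _ hne]
    apply congrArg
    simp only [List.drop_eq_getElem_cons h2, List.drop_eq_getElem_cons hk1,
      show k + 1 + 1 = k + 2 from by omega, List.map_cons, List.reverse_cons,
      List.cons_append, List.append_assoc, pvRender, pvPh]

theorem pv_assemble_zero (P : List (Int × String)) (h : P ≠ []) :
    pvA_assemble P 0 =
      PySem.Str.join "\n" (P.map pvRender ++ ((P.drop 2).map pvPh).reverse) := by
  have h0 : 0 < P.length := List.length_pos_iff.mpr h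
  have hget : PySem.List.pyGetD P ((0 : Nat) : Int) (0, "") = P[0] := by
    rw [PySem.List.pyGetD_natCast, List.getD_eq_getElem P _ h0]
  by_cases h1 : 1 < P.length
  · rw [pvA_assemble, dif_pos h1]
    simp only [show ¬ (0 < 0) by omega, if_false]
    rw [pv_assemble_aux P (P.length - 2) 1 le_rfl h1 (by omega)]
    have hne : (P.drop 1).map pvRender ++ ((P.drop 2).map pvPh).reverse ≠ [] := by
      intro hc
      rcases List.append_eq_nil_iff.mp hc with ⟨hc1, _⟩
      have := List.drop_eq_nil_iff.mp (List.map_eq_nil_iff.mp hc1)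
      omega
    rw [hget]
    rw [pv_strjoin2 _ _ _ hne]
    apply congrArg
    have hm : P.map pvRender = pvRender P[0] :: (P.drop 1).map pvRender := by
      cases P with
      | nil => exact absurd rfl h
      | cons a t => rfl
    rw [hm, List.cons_append]
    rfl
  · have hlen : P.length = 1 := by omega
    rw [pvA_assemble, dif_neg (by omega : ¬ (0 + 1 < P.length))]
    have hP : P = [P[0]] := by
      obtain ⟨a, ha⟩ := List.length_eq_one_iff.mp hlen
      subst ha
      rfl
    rw [hget]
    rw [List.drop_eq_nil_of_le (by omega : P.length ≤ 2)]
    conv_rhs => rw [hP]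
    simp only [List.map_cons, List.map_nil, List.reverse_nil, List.append_nil, pvRender]

theorem pv_phs_eq (P : List (Int × String)) :
    (PySem.List.pyRange ((P.length : Int) - 1) 1 (-1)).map
        (fun i => String.ofList (List.replicate (PySem.List.pyGetD P i (0, "")).1.toNat ' ' ++ "- ...".toList)) =
      ((P.drop 2).map pvPh).reverse := by
  rw [PySem.List.pyRange_neg_one_eq_reverse]
  rw [show (1 : Int) + 1 = 2 by ring, show (P.length : Int) - 1 + 1 = (P.length : Int) by ring]
  rw [List.map_reverse]
  have hmap : (PySem.List.pyRange 2 (P.length : Int)).map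
      (fun i => String.ofList (List.replicate (PySem.List.pyGetD P i (0, "")).1.toNat ' ' ++ "- ...".toList)) =
      ((PySem.List.pyRange 2 (P.length : Int)).map (fun j => PySem.List.pyGetD P j (0, ""))).map pvPh := by
    rw [List.map_map]
    rfl
  rw [hmap, PySem.List.map_pyGetD_pyRange' P (0, "") (by omega : (0 : Int) ≤ 2)]
  rfl

theorem pv_loop_nil (tgt : String) (lines : List String) :
    pvB_loop tgt lines [] =
      (pvSplitFirst tgt lines).map (fun m => pvStep (pvStack m.1) m.2.1) := by
  have h := pv_loop_eq tgt lines []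
  simpa [pvStack] using h

theorem pv_ports_agree (page target : String) :
    condensed_path page target = condensed_path_alt page target := by
  unfold condensed_path condensed_path_alt
  dsimp only
  rw [pv_find_enumerate
    (PySem.List.pyGetD (PySem.Str.splitlines (PySem.Str.strip target)) 0 "") (PySem.Str.splitlines page) 0]
  rw [pv_loop_nil (PySem.List.pyGetD (PySem.Str.splitlines (PySem.Str.strip target)) 0 "") (PySem.Str.splitlines page)]
  cases hs : pvSplitFirst (PySem.List.pyGetD (PySem.Str.splitlines (PySem.Str.strip target)) 0 "") (PySem.Str.splitlines page) with
  | none => simp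
  | some m =>
    obtain ⟨mid, l, rest⟩ := m
    have hlines := pv_splitFirst_decomp _ _ mid rest l hs
    simp only [Option.map_some]
    have hln : PySem.List.pyGetD (PySem.Str.splitlines page) ((0 : Int) + (mid.length : Int)) "" = l := by
      rw [zero_add, hlines]
      simp [PySem.List.pyGetD, PySem.List.pyGet?_append_length]
    rw [hln]
    have hrange : (0 : Int) + (mid.length : Int) - 1 = (mid.length : Int) - 1 := by ring
    rw [hrange]
    conv_lhs => rw [hlines]
    rw [pv_walk_eq_chain mid (l :: rest) [(pvA_indentOf l, PySem.Str.lstrip l)] (pvA_indentOf l)]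
    rw [show pvStep (pvStack mid) l =
        (pvA_indentOf l, PySem.Str.lstrip l) :: pvChain mid.reverse (pvA_indentOf l) from by
      unfold pvStep pvEntry
      rw [pv_pop_stack_eq_chain mid (pvA_indentOf l)]]
    rw [List.singleton_append, List.reverse_cons]
    rw [pv_assemble_zero ((pvChain mid.reverse (pvA_indentOf l)).reverse ++ [(pvA_indentOf l, PySem.Str.lstrip l)]) (by simp)]
    rw [pv_phs_eq ((pvChain mid.reverse (pvA_indentOf l)).reverse ++ [(pvA_indentOf l, PySem.Str.lstrip l)])]
    rfl

-- ===== VERDICT (by name: the statement is the Claim_ definition above) =====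
theorem condensed_path_spec : Claim_equal_condensed_path := by
  intro page target _ _
  unfold Spec_condensed_path
  exact pv_ports_agree page target
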